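-- pv_equiv track=rewrite | github.com/EliEhrman/agent | embed.py | make_var_list
-- ===== SOURCE A (Python) =====
-- def make_var_list(l_phrases):
-- 	l_vars = ()
-- 	vars_dict = dict()
-- 	for iphrase, phrase in enumerate(l_phrases):
-- 		for iel, el in enumerate(phrase):
-- 			src_pos = vars_dict.get(el, ())
-- 			if src_pos == ():
-- 				vars_dict[el] = (iphrase, iel)
-- 			else:
-- 				src_iphrase, src_iel = src_pos
-- 				l_vars += (src_iphrase, src_iel, iphrase, iel),
-- 	return l_vars
-- ===== SOURCE B (Python) =====
-- def make_var_list(l_phrases):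
--     # Pass 1: record the first position seen for each element.
--     first = {}
--     for iphrase, phrase in enumerate(l_phrases):
--         for iel, el in enumerate(phrase):
--             first.setdefault(el, (iphrase, iel))
--     # Pass 2: every occurrence that is not the first one is a duplicate.
--     l_vars = []
--     for iphrase, phrase in enumerate(l_phrases):
--         for iel, el in enumerate(phrase):
--             src_iphrase, src_iel = first[el]
--             if (src_iphrase, src_iel) != (iphrase, iel):
--                 l_vars.append((src_iphrase, src_iel, iphrase, iel))
--     return tuple(l_vars)
-- ===== Notes on version B (the rewrite author's own statement) =====
-- stated objective: faster
-- what changed: Replaced the single interleaved loop that grows a tuple with += while mutating the dict with two separate passes: pass 1 builds a first-position index via setdefault, pass 2 re-scans and appends every non-first occurrence to a list, returned as a tuple.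
import Mathlib
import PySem

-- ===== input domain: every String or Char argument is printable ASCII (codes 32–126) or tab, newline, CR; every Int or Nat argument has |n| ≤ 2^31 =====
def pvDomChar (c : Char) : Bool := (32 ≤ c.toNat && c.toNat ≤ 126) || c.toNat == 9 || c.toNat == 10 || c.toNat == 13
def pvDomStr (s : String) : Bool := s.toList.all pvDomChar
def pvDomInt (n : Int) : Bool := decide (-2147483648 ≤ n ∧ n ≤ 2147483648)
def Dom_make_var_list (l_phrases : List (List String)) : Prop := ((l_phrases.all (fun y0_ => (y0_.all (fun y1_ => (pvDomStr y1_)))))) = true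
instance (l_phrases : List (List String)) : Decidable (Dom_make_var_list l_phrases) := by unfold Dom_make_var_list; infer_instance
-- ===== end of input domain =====

-- B replaces A's single interleaved scan (which grows a tuple with += while mutating the
-- dict) by two separate passes: pass 1 builds a first-position index, pass 2 re-scans and
-- appends non-first occurrences to a list; avoids A's quadratic tuple concatenation.

-- ===== PORT A =====
def make_var_list (l_phrases : List (List String)) : List (Int × Int × Int × Int) :=
  ((PySem.List.enumerate l_phrases).foldl
    (fun (st : List (Int × Int × Int × Int) × PySem.Dict String (Int × Int)) ipp =>
      (PySem.List.enumerate ipp.2).foldl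
        (fun st iee =>
          match st.2.get? iee.2 with      -- vars_dict.get(el, ()); () ⇔ absent since values are pairs
          | none => (st.1, st.2.insert iee.2 (ipp.1, iee.1))
          | some p => (st.1 ++ [(p.1, p.2, ipp.1, iee.1)], st.2))
        st)
    ([], PySem.Dict.empty)).1

-- ===== PORT B =====
def make_var_list_alt (l_phrases : List (List String)) : List (Int × Int × Int × Int) :=
  let first : PySem.Dict String (Int × Int) :=
    (PySem.List.enumerate l_phrases).foldl
      (fun d ipp =>
        (PySem.List.enumerate ipp.2).foldl
          (fun d iee => d.setdefault iee.2 (ipp.1, iee.1)) d)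
      PySem.Dict.empty
  (PySem.List.enumerate l_phrases).foldl
    (fun out ipp =>
      (PySem.List.enumerate ipp.2).foldl
        (fun out iee =>
          match first.get? iee.2 with
          | some p =>
              if (p.1, p.2) ≠ (ipp.1, iee.1) then out ++ [(p.1, p.2, ipp.1, iee.1)] else out
          | none => out)                 -- unreachable: pass 1 inserted every scanned element
        out)
    []

-- ===== PRECONDITION & SPEC =====
def Spec_make_var_list (l_phrases : List (List String)) (out : List (Int × Int × Int × Int)) : Prop := out = make_var_list_alt l_phrases
instance (l_phrases : List (List String)) (out : List (Int × Int × Int × Int)) : Decidable (Spec_make_var_list l_phrases out) := by unfold Spec_make_var_list; infer_instance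

-- ===== CLAIM (what is proved, stated in full; the proofs are below) =====
def Claim_equal_make_var_list : Prop := ∀ (l_phrases : List (List String)), Dom_make_var_list l_phrases → Spec_make_var_list l_phrases (make_var_list l_phrases)

-- ===== LEMMAS AND PROOFS =====

-- the flattened scan: one (iphrase, iel, el) triple per element occurrence, in scan order
def pvOccs (l : List (List String)) : List (Int × Int × String) :=
  (PySem.List.enumerate l).flatMap
    (fun ipp => (PySem.List.enumerate ipp.2).map (fun iee => (ipp.1, iee.1, iee.2)))

def pvPos (t : Int × Int × String) : Int × Int := (t.1, t.2.1)

def pvStepA (st : List (Int × Int × Int × Int) × PySem.Dict String (Int × Int))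
    (t : Int × Int × String) : List (Int × Int × Int × Int) × PySem.Dict String (Int × Int) :=
  match st.2.get? t.2.2 with
  | none => (st.1, st.2.insert t.2.2 (t.1, t.2.1))
  | some p => (st.1 ++ [(p.1, p.2, t.1, t.2.1)], st.2)

def pvStepB (D : PySem.Dict String (Int × Int)) (out : List (Int × Int × Int × Int))
    (t : Int × Int × String) : List (Int × Int × Int × Int) :=
  match D.get? t.2.2 with
  | some p => if (p.1, p.2) ≠ (t.1, t.2.1) then out ++ [(p.1, p.2, t.1, t.2.1)] else out
  | none => out

def pvSD (d : PySem.Dict String (Int × Int)) (occ : List (Int × Int × String)) :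
    PySem.Dict String (Int × Int) :=
  occ.foldl (fun d t => d.setdefault t.2.2 (t.1, t.2.1)) d

lemma pvFoldl_flatMap {α β γ : Type} (l : List α) (g : α → List β) (f : γ → β → γ) (init : γ) :
    (l.flatMap g).foldl f init = l.foldl (fun acc x => (g x).foldl f acc) init := by
  induction l generalizing init with
  | nil => rfl
  | cons x xs ih => simp [List.flatMap_cons, List.foldl_append, ih]

lemma pvA_eq_flat (l : List (List String)) :
    make_var_list l = ((pvOccs l).foldl pvStepA ([], PySem.Dict.empty)).1 := by
  unfold make_var_list pvOccs
  rw [pvFoldl_flatMap]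
  congr 1
  refine PySem.List.foldl_congr_mem _ _ _ _ (fun st ipp _ => ?_)
  rw [List.foldl_map]
  rfl

lemma pvB_eq_flat (l : List (List String)) :
    make_var_list_alt l = (pvOccs l).foldl (pvStepB (pvSD PySem.Dict.empty (pvOccs l))) [] := by
  unfold make_var_list_alt pvOccs pvSD
  rw [pvFoldl_flatMap, pvFoldl_flatMap]
  have hd : ∀ (d : PySem.Dict String (Int × Int)),
      (PySem.List.enumerate l).foldl
        (fun d ipp => (PySem.List.enumerate ipp.2).foldl
          (fun d iee => d.setdefault iee.2 (ipp.1, iee.1)) d) d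
      = (PySem.List.enumerate l).foldl
        (fun acc x => ((PySem.List.enumerate x.2).map (fun iee => (x.1, iee.1, iee.2))).foldl
          (fun d t => d.setdefault t.2.2 (t.1, t.2.1)) acc) d := by
    intro d
    refine PySem.List.foldl_congr_mem _ _ _ _ (fun st ipp _ => ?_)
    rw [List.foldl_map]
  rw [hd]
  refine PySem.List.foldl_congr_mem _ _ _ _ (fun st ipp _ => ?_)
  rw [List.foldl_map]
  rfl

lemma pvSD_get?_of_some (occ : List (Int × Int × String)) (d : PySem.Dict String (Int × Int))
    (s : String) (p : Int × Int) (h : d.get? s = some p) : (pvSD d occ).get? s = some p := by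
  induction occ generalizing d with
  | nil => exact h
  | cons t rest ih =>
    apply ih
    by_cases hk : s = t.2.2
    · subst hk
      rw [PySem.Dict.get?_setdefault_self]
      simp [h]
    · rw [PySem.Dict.get?_setdefault_of_ne _ _ hk]
      exact h

lemma pvMain (occ : List (Int × Int × String)) (d : PySem.Dict String (Int × Int))
    (acc : List (Int × Int × Int × Int))
    (H : ∀ s p, d.get? s = some p → (p.1, p.2) ∉ occ.map pvPos)
    (Hnd : (occ.map pvPos).Nodup) :
    (occ.foldl pvStepA (acc, d)).1 = occ.foldl (pvStepB (pvSD d occ)) acc := by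
  induction occ generalizing d acc with
  | nil => rfl
  | cons t rest ih =>
    obtain ⟨ip, ie, s⟩ := t
    simp only [List.map_cons, List.nodup_cons] at Hnd
    rcases Hnd with ⟨hnotin, hndrest⟩
    cases hget : d.get? s with
    | some p =>
      have hcont : d.contains s = true := by
        rw [PySem.Dict.contains_eq_isSome_get?, hget]; rfl
      have hSD : pvSD d ((ip, ie, s) :: rest) = pvSD d rest := by
        show pvSD (d.setdefault s (ip, ie)) rest = pvSD d rest
        rw [PySem.Dict.setdefault_of_contains _ _ hcont]
      have hDget : (pvSD d ((ip, ie, s) :: rest)).get? s = some p := by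
        rw [hSD]; exact pvSD_get?_of_some _ _ _ _ hget
      have hA : List.foldl pvStepA (acc, d) ((ip, ie, s) :: rest)
          = List.foldl pvStepA (acc ++ [(p.1, p.2, ip, ie)], d) rest := by
        simp only [List.foldl_cons, pvStepA, hget]
      have hpne : (p.1, p.2) ≠ (ip, ie) := by
        intro hcontra
        apply H s p hget
        simp [pvPos, hcontra]
      have hB : List.foldl (pvStepB (pvSD d ((ip, ie, s) :: rest))) acc ((ip, ie, s) :: rest)
          = List.foldl (pvStepB (pvSD d ((ip, ie, s) :: rest))) (acc ++ [(p.1, p.2, ip, ie)]) rest := by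
        simp only [List.foldl_cons, pvStepB, hDget]
        rw [if_pos hpne]
      rw [hA, hB, hSD]
      exact ih d (acc ++ [(p.1, p.2, ip, ie)])
        (fun s' p' h' => fun hm => H s' p' h' (List.mem_cons_of_mem _ hm)) hndrest
    | none =>
      have hcont : d.contains s = false := by
        rw [PySem.Dict.contains_eq_isSome_get?, hget]; rfl
      have hSD : pvSD d ((ip, ie, s) :: rest) = pvSD (d.insert s (ip, ie)) rest := by
        show pvSD (d.setdefault s (ip, ie)) rest = _
        rw [PySem.Dict.setdefault_of_not_contains _ _ hcont]
      have hDget : (pvSD d ((ip, ie, s) :: rest)).get? s = some (ip, ie) := by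
        rw [hSD]
        exact pvSD_get?_of_some _ _ _ _ (PySem.Dict.get?_insert_self _ _ _)
      have hA : List.foldl pvStepA (acc, d) ((ip, ie, s) :: rest)
          = List.foldl pvStepA (acc, d.insert s (ip, ie)) rest := by
        simp only [List.foldl_cons, pvStepA, hget]
      have hB : List.foldl (pvStepB (pvSD d ((ip, ie, s) :: rest))) acc ((ip, ie, s) :: rest)
          = List.foldl (pvStepB (pvSD d ((ip, ie, s) :: rest))) acc rest := by
        simp only [List.foldl_cons, pvStepB, hDget]
        simp
      rw [hA, hB, hSD]
      refine ih (d.insert s (ip, ie)) acc (fun s' p' h' hm => ?_) hndrest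
      by_cases hk : s' = s
      · subst hk
        rw [PySem.Dict.get?_insert_self] at h'
        cases h'
        exact hnotin (by simpa [pvPos] using hm)
      · rw [PySem.Dict.get?_insert_of_ne _ _ hk] at h'
        exact H s' p' h' (List.mem_cons_of_mem _ hm)

lemma pvNodup_pos (l : List (List String)) : ((pvOccs l).map pvPos).Nodup := by
  unfold pvOccs
  rw [List.map_flatMap, List.nodup_flatMap]
  constructor
  · intro x _
    rw [List.map_map]
    refine List.Pairwise.map _ (fun a b hab => ?_) (PySem.List.pairwise_lt_enumerate x.2 0)
    simp only [Function.comp, pvPos, ne_eq, Prod.mk.injEq, not_and]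
    intro _ h2
    omega
  · refine (PySem.List.pairwise_lt_enumerate l 0).imp (fun {a b} hab => ?_)
    intro p hpa hpb
    simp only [List.map_map, List.mem_map, Function.comp, pvPos] at hpa hpb
    obtain ⟨u, _, hu⟩ := hpa
    obtain ⟨v, _, hv⟩ := hpb
    rw [← hu] at hv
    simp only [Prod.mk.injEq] at hv
    omega

-- ===== VERDICT (by name: the statement is the Claim_ definition above) =====
theorem make_var_list_spec : Claim_equal_make_var_list := by
  intro l _
  show make_var_list l = make_var_list_alt l
  rw [pvA_eq_flat, pvB_eq_flat]
  exact pvMain (pvOccs l) PySem.Dict.empty []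
    (fun s p h => by simp [PySem.Dict.get?_empty] at h) (pvNodup_pos l)
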